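-- pv_equiv track=rewrite | github.com/hideaway007/paperforge-cn | runtime/agents/search_planner.py | _paired_terms
-- ===== SOURCE A (Python) =====
-- def _paired_terms(left_terms: list[str], right_terms: list[str], max_terms: int) -> list[str]:
--     paired = []
--     for left in left_terms:
--         for right in right_terms:
--             if left == right:
--                 continue
--             paired.append(f"{left} {right}")
--             if len(paired) >= max_terms:
--                 return _unique_terms(paired)
--     return _unique_terms(paired)
--
-- def _unique_terms(terms: list[str]) -> list[str]:
--     seen = set()
--     unique = []
--     for term in terms:
--         normalized = term.strip()
--         if not normalized or normalized in seen:
--             continue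
--         seen.add(normalized)
--         unique.append(normalized)
--     return unique
-- ===== SOURCE B (Python) =====
-- def _paired_terms(left_terms: list[str], right_terms: list[str], max_terms: int) -> list[str]:
--     # Single pass: generate and dedupe together; `count` tracks raw non-equal
--     # pairs (the quantity A's cap measures), `seen` dedupes stripped terms.
--     result = []
--     seen = set()
--     count = 0
--     for left in left_terms:
--         for right in right_terms:
--             if left == right:
--                 continue
--             count += 1
--             normalized = " ".join((left, right)).strip()
--             if normalized and normalized not in seen:
--                 seen.add(normalized)
--                 result.append(normalized)
--             if count >= max_terms:
--                 return result
--     return result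
-- ===== Notes on version B (the rewrite author's own statement) =====
-- stated objective: alternative
-- what changed: Fuses generation and deduplication into one pass with a seen-set and a raw-pair counter, eliminating the intermediate raw list and the separate _unique_terms scan.
import Mathlib
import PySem

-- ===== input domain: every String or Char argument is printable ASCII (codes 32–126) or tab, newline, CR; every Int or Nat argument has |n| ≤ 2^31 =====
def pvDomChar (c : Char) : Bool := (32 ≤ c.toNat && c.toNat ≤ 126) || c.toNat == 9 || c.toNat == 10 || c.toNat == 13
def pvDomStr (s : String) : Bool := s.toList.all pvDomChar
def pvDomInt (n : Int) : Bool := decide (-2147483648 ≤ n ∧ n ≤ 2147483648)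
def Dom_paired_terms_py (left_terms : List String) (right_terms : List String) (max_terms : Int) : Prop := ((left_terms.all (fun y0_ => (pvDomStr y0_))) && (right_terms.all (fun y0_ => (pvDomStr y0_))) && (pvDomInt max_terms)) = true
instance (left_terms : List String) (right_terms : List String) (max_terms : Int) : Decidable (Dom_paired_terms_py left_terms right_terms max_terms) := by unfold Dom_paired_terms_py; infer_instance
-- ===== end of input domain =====

-- B fuses generation and deduplication into one pass (seen-set + raw-pair counter),
-- dropping A's intermediate raw list and separate _unique_terms scan.

-- ===== PORT A =====
-- the _unique_terms loop; returns the (seen, unique) state (f"{l} {r}" ported as " ".join([l, r]), exact)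
def uniqueLoopA (terms : List String) (seen : PySem.Set String) (unique : List String) :
    PySem.Set String × List String :=
  match terms with
  | [] => (seen, unique)
  | t :: rest =>
    let normalized := PySem.Str.strip t
    if normalized = "" ∨ normalized ∈ seen then uniqueLoopA rest seen unique
    else uniqueLoopA rest (PySem.Set.add seen normalized) (unique ++ [normalized])

def unique_terms_py (terms : List String) : List String :=
  (uniqueLoopA terms PySem.Set.empty []).2

-- inner 'for right in right_terms' loop of A; Bool = early return taken
def innerA (left : String) (rs : List String) (paired : List String) (m : Int) :
    List String × Bool :=
  match rs with
  | [] => (paired, false)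
  | right :: rest =>
    if left = right then innerA left rest paired m
    else
      let paired' := paired ++ [PySem.Str.join " " [left, right]]
      if PySem.List.len paired' ≥ m then (paired', true)
      else innerA left rest paired' m

def outerA (ls : List String) (rs : List String) (paired : List String) (m : Int) :
    List String × Bool :=
  match ls with
  | [] => (paired, false)
  | left :: rest =>
    let r := innerA left rs paired m
    if r.2 then r else outerA rest rs r.1 m

def paired_terms_py (left_terms : List String) (right_terms : List String) (max_terms : Int) : List String :=
  unique_terms_py (outerA left_terms right_terms [] max_terms).1

-- ===== PORT B =====
-- state: (count, seen, result); Bool = early return taken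
def innerB (left : String) (rs : List String) (count : Int) (seen : PySem.Set String)
    (result : List String) (m : Int) : Int × PySem.Set String × List String × Bool :=
  match rs with
  | [] => (count, seen, result, false)
  | right :: rest =>
    if left = right then innerB left rest count seen result m
    else
      let count' := count + 1
      let normalized := PySem.Str.strip (PySem.Str.join " " [left, right])
      let st :=
        if normalized = "" ∨ normalized ∈ seen then (seen, result)
        else (PySem.Set.add seen normalized, result ++ [normalized])
      if count' ≥ m then (count', st.1, st.2, true)
      else innerB left rest count' st.1 st.2 m

def outerB (ls : List String) (rs : List String) (count : Int) (seen : PySem.Set String)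
    (result : List String) (m : Int) : Int × PySem.Set String × List String × Bool :=
  match ls with
  | [] => (count, seen, result, false)
  | left :: rest =>
    let r := innerB left rs count seen result m
    if r.2.2.2 then r else outerB rest rs r.1 r.2.1 r.2.2.1 m

def paired_terms_py_alt (left_terms : List String) (right_terms : List String) (max_terms : Int) : List String :=
  (outerB left_terms right_terms 0 PySem.Set.empty [] max_terms).2.2.1

-- ===== PRECONDITION & SPEC =====
def Spec_paired_terms_py (left_terms : List String) (right_terms : List String) (max_terms : Int) (out : List String) : Prop := out = paired_terms_py_alt left_terms right_terms max_terms
instance (left_terms : List String) (right_terms : List String) (max_terms : Int) (out : List String) : Decidable (Spec_paired_terms_py left_terms right_terms max_terms out) := by unfold Spec_paired_terms_py; infer_instance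

-- ===== CLAIM (what is proved, stated in full; the proofs are below) =====
def Claim_equal_paired_terms_py : Prop := ∀ (left_terms : List String) (right_terms : List String) (max_terms : Int), Dom_paired_terms_py left_terms right_terms max_terms → Spec_paired_terms_py left_terms right_terms max_terms (paired_terms_py left_terms right_terms max_terms)

-- ===== LEMMAS AND PROOFS =====

-- appending one term to the dedup loop's input applies one dedup step at the end
theorem uniqueLoopA_append_singleton (P : List String) (t : String)
    (s : PySem.Set String) (u : List String) :
    uniqueLoopA (P ++ [t]) s u =
      (let r := uniqueLoopA P s u
       let n := PySem.Str.strip t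
       if n = "" ∨ n ∈ r.1 then r else (PySem.Set.add r.1 n, r.2 ++ [n])) := by
  induction P generalizing s u with
  | nil => simp [uniqueLoopA]
  | cons h tl ih =>
    simp only [List.cons_append, uniqueLoopA]
    split <;> exact ih _ _

theorem len_append_singleton (P : List String) (x : String) :
    PySem.List.len (P ++ [x]) = PySem.List.len P + 1 := by
  simp [PySem.List.len_eq]

-- invariant transport for the inner loops
theorem innerB_eq (left : String) (rs : List String) (m : Int) :
    ∀ (P : List String) (seen : PySem.Set String) (u : List String),
      (seen, u) = uniqueLoopA P PySem.Set.empty [] →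
      innerB left rs (PySem.List.len P) seen u m =
        (PySem.List.len (innerA left rs P m).1,
         (uniqueLoopA (innerA left rs P m).1 PySem.Set.empty []).1,
         (uniqueLoopA (innerA left rs P m).1 PySem.Set.empty []).2,
         (innerA left rs P m).2) := by
  induction rs with
  | nil =>
    intro P seen u h
    simp only [innerA, innerB]
    rw [← h]
  | cons right rest ih =>
    intro P seen u h
    by_cases hlr : left = right
    · simpa [innerA, innerB, hlr] using ih P seen u h
    · have hstep := uniqueLoopA_append_singleton P (PySem.Str.join " " [left, right])
        PySem.Set.empty []
      simp only [innerA, innerB, hlr, ite_false]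
      rw [← len_append_singleton P (PySem.Str.join " " [left, right])]
      by_cases hcap : PySem.List.len (P ++ [PySem.Str.join " " [left, right]]) ≥ m
      · simp only [hcap, if_pos]
        rw [hstep, ← h]
      · simp only [hcap, ite_false]
        apply ih
        rw [hstep, ← h]

theorem outerB_eq (ls rs : List String) (m : Int) :
    ∀ (P : List String) (seen : PySem.Set String) (u : List String),
      (seen, u) = uniqueLoopA P PySem.Set.empty [] →
      outerB ls rs (PySem.List.len P) seen u m =
        (PySem.List.len (outerA ls rs P m).1,
         (uniqueLoopA (outerA ls rs P m).1 PySem.Set.empty []).1,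
         (uniqueLoopA (outerA ls rs P m).1 PySem.Set.empty []).2,
         (outerA ls rs P m).2) := by
  induction ls with
  | nil =>
    intro P seen u h
    simp only [outerA, outerB]
    rw [← h]
  | cons left rest ih =>
    intro P seen u h
    simp only [outerA, outerB]
    rw [innerB_eq left rs m P seen u h]
    by_cases hs : (innerA left rs P m).2
    · simp [hs]
    · simp only [hs, ite_false, Bool.false_eq_true]
      exact ih (innerA left rs P m).1 _ _ rfl

-- ===== VERDICT (by name: the statement is the Claim_ definition above) =====
theorem paired_terms_py_spec : Claim_equal_paired_terms_py := by
  intro ls rs m _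
  have h := outerB_eq ls rs m [] PySem.Set.empty [] rfl
  have h0 : PySem.List.len ([] : List String) = 0 := by simp [PySem.List.len_eq]
  rw [h0] at h
  show unique_terms_py (outerA ls rs [] m).1 = (outerB ls rs 0 PySem.Set.empty [] m).2.2.1
  rw [h]
  rfl
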